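-- pv_equiv track=rewrite | github.com/Lamella-ai/lamella | src/lamella/features/paperless_bridge/verify.py | _vendor_tokens
-- ===== SOURCE A (Python) =====
-- _VENDOR_STOPWORDS: frozenset[str] = frozenset({
--     # Articles + connectives.
--     "the", "a", "an", "and", "of", "for", "at", "by",
--     # Generic business / legal suffixes that carry no brand info.
--     "co", "inc", "corp", "ltd", "llc", "lp", "llp", "plc", "gmbh",
--     "store", "stores", "shop", "shops",
--     # Bank-statement noise: "via {processor}" qualifiers and
--     # transactional words bank statements love to inject.
--     "via", "by", "through", "purchase", "payment",
--     # Merchant-category descriptors that often appear on the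
--     # receipt header but not on the bank statement (or vice versa).
--     "self", "service", "online", "online.com", "com", "www",
-- })
--
-- def _vendor_tokens(s: str) -> set[str]:
--     """Tokenize a vendor string into a comparison-ready set: lowered,
--     punctuation-stripped, stop-words and ≤1-char tokens dropped.
--
--     Used by ``_vendor_matches_hypothesis`` to decide whether two
--     written forms describe the same merchant. Bank-statement form
--     and receipt-header form of any merchant diverge predictably:
--     the bank wraps the brand with city/state and a processor suffix,
--     the receipt wraps the brand with category descriptors. Neither
--     is a substring of the other but their distinctive brand +
--     location tokens are shared.
--     """
--     norm: list[str] = []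
--     for ch in (s or "").lower():
--         if ch.isalnum() or ch == " ":
--             norm.append(ch)
--         else:
--             norm.append(" ")
--     tokens = "".join(norm).split()
--     return {
--         t for t in tokens
--         if len(t) >= 2 and t not in _VENDOR_STOPWORDS
--     }
-- ===== SOURCE B (Python) =====
-- _VENDOR_STOPWORDS: frozenset[str] = frozenset({
--     "the", "a", "an", "and", "of", "for", "at", "by",
--     "co", "inc", "corp", "ltd", "llc", "lp", "llp", "plc", "gmbh",
--     "store", "stores", "shop", "shops",
--     "via", "by", "through", "purchase", "payment",
--     "self", "service", "online", "online.com", "com", "www",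
-- })
--
--
-- def _vendor_tokens(s: str) -> set[str]:
--     """Single pass: collect maximal alnum runs directly, flushing each run
--     into the result set, instead of normalizing to spaces + join + split."""
--     out: set[str] = set()
--     run: list[str] = []
--     for ch in (s or "").lower():
--         if ch.isalnum():
--             run.append(ch)
--         else:
--             if len(run) >= 2:
--                 t = "".join(run)
--                 if t not in _VENDOR_STOPWORDS:
--                     out.add(t)
--             run = []
--     if len(run) >= 2:
--         t = "".join(run)
--         if t not in _VENDOR_STOPWORDS:
--             out.add(t)
--     return out
-- ===== Notes on version B (the rewrite author's own statement) =====
-- stated objective: simpler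
-- what changed: Replaced the normalize-to-spaces/join/split pipeline with a single pass that accumulates maximal alnum runs and flushes each run into the result set directly.
import Mathlib
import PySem

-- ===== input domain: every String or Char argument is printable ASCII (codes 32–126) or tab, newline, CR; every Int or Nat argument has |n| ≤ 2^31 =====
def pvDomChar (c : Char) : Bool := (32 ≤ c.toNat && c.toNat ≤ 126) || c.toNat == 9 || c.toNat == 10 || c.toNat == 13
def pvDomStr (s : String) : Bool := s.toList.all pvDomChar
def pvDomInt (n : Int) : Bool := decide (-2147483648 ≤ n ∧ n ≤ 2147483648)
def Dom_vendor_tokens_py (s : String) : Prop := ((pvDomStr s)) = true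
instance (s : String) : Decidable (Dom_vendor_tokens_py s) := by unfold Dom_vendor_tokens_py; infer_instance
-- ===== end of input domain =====

-- B replaces A's normalize-to-spaces/join/split pipeline by a single pass that
-- accumulates maximal alnum runs and flushes them into the set (objective: simpler).

-- shared module constant: _VENDOR_STOPWORDS (a frozenset; only membership is used)
def vtStop : PySem.Set (List Char) :=
  PySem.Set.ofList
    (["the", "a", "an", "and", "of", "for", "at", "by",
      "co", "inc", "corp", "ltd", "llc", "lp", "llp", "plc", "gmbh",
      "store", "stores", "shop", "shops",
      "via", "through", "purchase", "payment",
      "self", "service", "online", "online.com", "com", "www"].map String.toList)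

-- ===== PORT A =====
def vendor_tokens_py (s : String) : List String :=
  let base : List Char := if s.toList.isEmpty then [] else s.toList   -- (s or "")
  let norm : List Char :=
    (PySem.Chars.lower base).foldl
      (fun acc ch =>
        if PySem.Chars.isalnum ch || ch == ' ' then acc ++ [ch] else acc ++ [' ']) []
  let tokens := PySem.Chars.split₀ norm
  (tokens.foldl
      (fun st t =>
        if 2 ≤ t.length && !(PySem.Set.contains vtStop t) then PySem.Set.add st t else st)
      PySem.Set.empty).map String.ofList

-- ===== PORT B =====
-- flush helper of Source B's loop body / epilogue
def vtFlush (out : PySem.Set (List Char)) (run : List Char) : PySem.Set (List Char) :=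
  if 2 ≤ run.length && !(PySem.Set.contains vtStop run) then PySem.Set.add out run else out

def vendor_tokens_py_alt (s : String) : List String :=
  let base : List Char := if s.toList.isEmpty then [] else s.toList   -- (s or "")
  let p :=
    (PySem.Chars.lower base).foldl
      (fun st ch =>
        if PySem.Chars.isalnum ch then (st.1, st.2 ++ [ch]) else (vtFlush st.1 st.2, []))
      (PySem.Set.empty, [])
  (vtFlush p.1 p.2).map String.ofList

-- ===== PRECONDITION & SPEC =====
def Spec_vendor_tokens_py (s : String) (out : List String) : Prop := out = vendor_tokens_py_alt s
instance (s : String) (out : List String) : Decidable (Spec_vendor_tokens_py s out) := by unfold Spec_vendor_tokens_py; infer_instance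

-- ===== CLAIM (what is proved, stated in full; the proofs are below) =====
def Claim_equal_vendor_tokens_py : Prop := ∀ (s : String), Dom_vendor_tokens_py s → Spec_vendor_tokens_py s (vendor_tokens_py s)

-- ===== LEMMAS AND PROOFS =====

-- A's per-character normalization
def vtF (ch : Char) : Char := if PySem.Chars.isalnum ch || ch == ' ' then ch else ' '

-- B's loop body
def vtStep (st : PySem.Set (List Char) × List Char) (ch : Char) :
    PySem.Set (List Char) × List Char :=
  if PySem.Chars.isalnum ch then (st.1, st.2 ++ [ch]) else (vtFlush st.1 st.2, [])

lemma vt_alnum_not_space (c : Char) (h : PySem.Chars.isalnum c = true) :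
    PySem.Chars.isspace c = false := by
  simp [PySem.Chars.isalnum, PySem.Chars.isalpha, PySem.Chars.isdigit, PySem.Chars.isupper,
    PySem.Chars.islower, Char.le_def, UInt32.le_iff_toNat_le, Char.toNat_val] at h
  simp [PySem.Chars.isspace]
  omega

lemma vt_f_of_not_alnum (c : Char) (h : PySem.Chars.isalnum c = false) : vtF c = ' ' := by
  by_cases hc : c = ' ' <;> simp [vtF, h, hc]

lemma vt_go_acc (cs cur : List Char) (acc : List (List Char)) :
    PySem.Chars.split₀.go cs cur acc = acc.reverse ++ PySem.Chars.split₀.go cs cur [] := by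
  induction cs generalizing cur acc with
  | nil =>
    by_cases h : cur.isEmpty <;> simp [PySem.Chars.split₀.go, h]
  | cons c rest ih =>
    by_cases hs : PySem.Chars.isspace c
    · by_cases h : cur.isEmpty
      · simp only [PySem.Chars.split₀.go, hs, h, if_true]
        exact ih [] acc
      · simp only [PySem.Chars.split₀.go, hs, h, if_true, if_false, Bool.false_eq_true]
        rw [ih [] (cur.reverse :: acc), ih [] [cur.reverse]]
        simp
    · simp only [PySem.Chars.split₀.go, hs, Bool.false_eq_true, if_false]
      rw [ih (c :: cur) acc]

lemma vt_main (cs : List Char) (cur : List Char) (S : PySem.Set (List Char)) :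
    (PySem.Chars.split₀.go (cs.map vtF) cur.reverse []).foldl
        (fun st t =>
          if 2 ≤ t.length && !(PySem.Set.contains vtStop t) then PySem.Set.add st t else st) S
      = vtFlush (cs.foldl vtStep (S, cur)).1 (cs.foldl vtStep (S, cur)).2 := by
  induction cs generalizing cur S with
  | nil =>
    by_cases h : cur = []
    · subst h; simp [PySem.Chars.split₀.go, vtFlush]
    · have : cur.reverse.isEmpty = false := by simp [h]
      simp [PySem.Chars.split₀.go, this, vtFlush]
  | cons c rest ih =>
    by_cases ha : PySem.Chars.isalnum c
    · have hf : vtF c = c := by simp [vtF, ha]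
      have hns := vt_alnum_not_space c ha
      simp only [List.map_cons, hf, PySem.Chars.split₀.go, hns, Bool.false_eq_true, if_false,
        List.foldl_cons, vtStep, ha, if_true]
      have hrev : c :: cur.reverse = (cur ++ [c]).reverse := by simp
      rw [hrev, ih (cur ++ [c]) S]
    · have hf : vtF c = ' ' := vt_f_of_not_alnum c (by simpa using ha)
      have hsp : PySem.Chars.isspace ' ' = true := by decide
      by_cases h : cur = []
      · subst h
        simp only [List.map_cons, hf, PySem.Chars.split₀.go, hsp, if_true, List.reverse_nil,
          List.isEmpty_nil, List.foldl_cons, vtStep, ha, Bool.false_eq_true, if_false]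
        have hSe : vtFlush S [] = S := by simp [vtFlush]
        have ih' := ih [] S
        simp only [List.reverse_nil] at ih'
        rw [hSe, ih']
      · have hne : cur.reverse.isEmpty = false := by simp [h]
        simp only [List.map_cons, hf, PySem.Chars.split₀.go, hsp, if_true, hne,
          Bool.false_eq_true, if_false, List.foldl_cons, vtStep, ha, List.reverse_reverse]
        rw [vt_go_acc (rest.map vtF) [] [cur]]
        simp only [List.reverse_cons, List.reverse_nil, List.nil_append, List.foldl_append,
          List.foldl_cons, List.foldl_nil]
        have ih' := ih [] (vtFlush S cur)
        simp only [List.reverse_nil] at ih'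
        rw [show (if (decide (2 ≤ cur.length) && !vtStop.contains cur) = true
              then PySem.Set.add S cur else S) = vtFlush S cur from rfl, ih']

lemma vt_norm_eq_map (cs : List Char) :
    cs.foldl
      (fun acc ch =>
        if PySem.Chars.isalnum ch || ch == ' ' then acc ++ [ch] else acc ++ [' ']) []
      = cs.map vtF := by
  have h : (fun (acc : List Char) ch =>
      if PySem.Chars.isalnum ch || ch == ' ' then acc ++ [ch] else acc ++ [' '])
      = fun acc ch => acc ++ [vtF ch] := by
    funext acc ch; by_cases h : PySem.Chars.isalnum ch || ch == ' ' <;> simp [vtF, h]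
  rw [h, PySem.List.foldl_append_singleton_eq_map]
  simp

-- ===== VERDICT (by name: the statement is the Claim_ definition above) =====
theorem vendor_tokens_py_spec : Claim_equal_vendor_tokens_py := by
  intro s _
  unfold Spec_vendor_tokens_py vendor_tokens_py vendor_tokens_py_alt
  simp only []
  rw [vt_norm_eq_map]
  unfold PySem.Chars.split₀
  have key := vt_main (PySem.Chars.lower (if s.toList.isEmpty then [] else s.toList)) []
    PySem.Set.empty
  simp only [List.reverse_nil] at key
  rw [key]
  rfl
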